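/- GENERATED by mk_final_copies.py from the proof of the farm's unit `vorbis_deinit.1` (farm:vorbis_deinit.1.1: Proof.lean) as the
   re-elaboration sweep compiled it — do not edit. -/
/-
  Unit `vorbis_deinit.1`: segment 1 of `vorbis_deinit` (0x1075c0 … 0x107740 → cut10 = 0x107745): the prologue, `vendor`, the comment
  loop (4240), `comment_list`, the residue walk (loops 4246, 4249).

  THE PLAN. Every state between two calls of `setup_free` satisfies the segment family's own assertion `vorbis_deinit.At c` (the
  function was entered at `e` with PRE-D; five registers pushed; `rbx = p`; nothing stored but below the entry rsp). One lemma per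
  stretch of code between two cut points (`At c v` + what the registers hold → `ReachVia … (At c' …)`), the assertion rebuilt by
  `at_next` (Lemmas.lean); the three loops are `ReachVia.loop` over these lemmas. Every value the code loads is read in the ENTRY
  memory `e.mem` (`at_read`), so that the loop invariants are about fixed numbers.
-/
import Asan.CheckWalk
import Vorbis.Spec.Units.vorbis_deinit_1
import Vorbis.Spec.Worked.vorbis_deinit_1_Lemmas

open X86 X86.User Asan Vorbis Vorbis.Spec

set_option maxRecDepth 4000
set_option maxHeartbeats 4000000

namespace Vorbis.Spec.vorbis_deinit_1

/-- 0x1075c0 … cut1 = 0x1075e0 (4236 – 4239): the five pushes, `setup_free(p, p->vendor)`. -/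
theorem blockA {Lay : Layout} (hLay : Lay.hi = 0x1000000) {μ : Microarch} (hμ : UserX.MicroOK μ) {u₀ : State}
    (hcode : HasCodeNat Lay u₀ Vorbis.L.vorbis_deinit.entry Vorbis.Code.code_vorbis_deinit.nat Vorbis.L.vorbis_deinit.size)
    (_h8 : Asan.SmallCheck Lay μ Vorbis.WayInv (Vorbis.CodeOK u₀) [.rax, .rcx, .rdx] 8 Vorbis.L.__asan_load8_noabort.entry)
    (hsf : ∀ (others : List Obj) (frames : List (Nat × FrameLayout)), Calls Lay μ Vorbis.WayInv (Vorbis.conv u₀) Vorbis.L.setup_free.entry (Vorbis.Spec.setup_free.spec others frames))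
    (others : List Obj) (frames : List (Nat × FrameLayout)) (Blk : Block → Prop) (e : State) (ret : Word)
    (he : AtEntry (conv u₀) L.vorbis_deinit.entry (vorbis_deinit.spec others frames Blk).frame ret e)
    (hpre : (vorbis_deinit.spec others frames Blk).pre e) :
    ReachVia Lay μ WayInv e (vorbis_deinit.At L.vorbis_deinit.cut1 others frames Blk u₀ e ret) := by
  have he' := he
  v_entry he
  obtain ⟨hsh, hok, hlive, hd⟩ := hpre
  have hsf' := hsf others frames
  u_walk hcode [hμ.vendor] until [Vorbis.L.vorbis_deinit.cut1] span [Vorbis.L.textLo, Vorbis.L.textHi] side (v_side)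
  case check_1075cf =>
    have hun : ShadowUntouched e.mem s_1075cf.mem := by v_untouched
    have hob : ObjLive others frames (e.reg .rdi).toNat := ObjLive.of_ob1 hlive hd.ob1
    have hw := hob.where_ hsh.inv hsh.offText (by omega)
    exact hob.accSmall hsh.inv hun _ 8 (by decide) (by u_omega) (by u_omega)
  case call_inv =>
    v_inv
  case pre_1075db =>
    have hun : ShadowUntouched e.mem s_1075db.mem := by v_untouched
    refine ⟨hsh.call hun (by u_omega) (by u_omega) (by u_omega), ?_⟩
    rw [w_rdi]
    exact ObjLive.of_ob1 hlive hd.ob1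
  case cont =>
    v_after_call w_rsp_1075db w_mem_1075db
    have hs1 : s_1075dbr.mem.readLE (e.reg .rsp - 8) 8 = (e.reg .r14).toNat := by
      have h : s_1075db.mem.readLE (e.reg .rsp - 8) 8 = (e.reg .r14).toNat := by
        rw [w_mem_1075db]
        u_read
      rw [w_mem_1075db] at h
      u_frame h
    have hs2 : s_1075dbr.mem.readLE (e.reg .rsp - 16) 8 = (e.reg .r13).toNat := by
      have h : s_1075db.mem.readLE (e.reg .rsp - 16) 8 = (e.reg .r13).toNat := by
        rw [w_mem_1075db]
        u_read
      rw [w_mem_1075db] at h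
      u_frame h
    have hs3 : s_1075dbr.mem.readLE (e.reg .rsp - 24) 8 = (e.reg .r12).toNat := by
      have h : s_1075db.mem.readLE (e.reg .rsp - 24) 8 = (e.reg .r12).toNat := by
        rw [w_mem_1075db]
        u_read
      rw [w_mem_1075db] at h
      u_frame h
    have hs4 : s_1075dbr.mem.readLE (e.reg .rsp - 32) 8 = (e.reg .rbp).toNat := by
      have h : s_1075db.mem.readLE (e.reg .rsp - 32) 8 = (e.reg .rbp).toNat := by
        rw [w_mem_1075db]
        u_read
      rw [w_mem_1075db] at h
      u_frame h
    have hs5 : s_1075dbr.mem.readLE (e.reg .rsp - 40) 8 = (e.reg .rbx).toNat := by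
      have h : s_1075db.mem.readLE (e.reg .rsp - 40) 8 = (e.reg .rbx).toNat := by
        rw [w_mem_1075db]
        u_read
      rw [w_mem_1075db] at h
      u_frame h
    have hsame : Mem.SameExcept [⟨(e.reg .rsp).toNat - 96, (e.reg .rsp).toNat⟩] e.mem s_1075dbr.mem := by
      u_same
    refine ReachVia.done ?_
    exact ⟨he', ⟨hsh, hok, hlive, hd⟩, w_rip, w_rsp, w_rbx, w_kept .r15 rfl, hs1, hs2, hs3, hs4, hs5, hsame, w_code, w_inv⟩

/-- cut1 = 0x1075e0 … cut3 = 0x107614 (4240): `i = 0`, to the head of the comment loop. -/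
theorem to_loop1 {Lay : Layout} (hLay : Lay.hi = 0x1000000) {μ : Microarch} (hμ : UserX.MicroOK μ) {u₀ : State}
    (hcode : HasCodeNat Lay u₀ Vorbis.L.vorbis_deinit.entry Vorbis.Code.code_vorbis_deinit.nat Vorbis.L.vorbis_deinit.size)
    (_h8 : Asan.SmallCheck Lay μ Vorbis.WayInv (Vorbis.CodeOK u₀) [.rax, .rcx, .rdx] 8 Vorbis.L.__asan_load8_noabort.entry)
    (_h4 : Asan.SmallCheck Lay μ Vorbis.WayInv (Vorbis.CodeOK u₀) [.rax, .rcx, .rdx] 4 Vorbis.L.__asan_load4_noabort.entry)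
    (_h1 : Asan.SmallCheck Lay μ Vorbis.WayInv (Vorbis.CodeOK u₀) [.rax, .rdx] 1 Vorbis.L.__asan_load1_noabort.entry)
    (hsf : ∀ (others : List Obj) (frames : List (Nat × FrameLayout)), Calls Lay μ Vorbis.WayInv (Vorbis.conv u₀) Vorbis.L.setup_free.entry (Vorbis.Spec.setup_free.spec others frames))
    (others : List Obj) (frames : List (Nat × FrameLayout)) (Blk : Block → Prop) (e : State) (ret : Word) (v : State)
    (hat : vorbis_deinit.At L.vorbis_deinit.cut1 others frames Blk u₀ e ret v) :
    ReachVia Lay μ WayInv v (fun w => vorbis_deinit.At L.vorbis_deinit.cut3 others frames Blk u₀ e ret w ∧ (w.reg .r12).toNat < 2 ^ 31) := by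
  have he := hat.entry
  v_entry he
  obtain ⟨hsh, hok, hlive, hd⟩ := hat.pre
  have hsf' := hsf others frames
  have w_rip := hat.rip
  have c_rsp := hat.rsp
  have c_rbx := hat.rbx
  have w_eq := Vorbis.conv_code_eqOn hat.code
  have hdf : v.flags .df = false := (show abiInv _ from hat.inv).1
  have hmx : v.mxcsr &&& 0x1F80 = 0x1F80 := (show abiInv _ from hat.inv).2
  have hsse := Vorbis.sseOK_of_abiInv hat.inv
  have hsame := hat.same
  have hob : ObjLive others frames (e.reg .rdi).toNat := ObjLive.of_ob1 hlive hd.ob1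
  have hw := hob.where_ hsh.inv hsh.offText (by omega)
  u_walk hcode [hμ.vendor] until [Vorbis.L.vorbis_deinit.cut3] span [Vorbis.L.textLo, Vorbis.L.textHi] side (v_side)
  have hs : Mem.SameExcept [⟨(e.reg .rsp).toNat - 96, (e.reg .rsp).toNat - 40⟩] v.mem s_1075e6.mem := by
    rw [w_mem]
    exact Mem.SameExcept.refl _ _
  refine ReachVia.done ⟨at_next hat hs w_rip (by rw [w_kept .rsp rfl]; exact c_rsp) (by rw [w_kept .rbx rfl]; exact c_rbx) (w_kept .r15 rfl) (Vorbis.conv_code_in w_eq) ?_, ?_⟩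
  · v_inv
  · rw [w_r12]
    decide

/-- One round of the comment loop from its head cut3 = 0x107614 (4240 – 4243): into the body and back to the head with `i + 1`, or out through `setup_free(p, p->comment_list)` to cut4 = 0x107638. -/
theorem loop1_body {Lay : Layout} (hLay : Lay.hi = 0x1000000) {μ : Microarch} (hμ : UserX.MicroOK μ) {u₀ : State}
    (hcode : HasCodeNat Lay u₀ Vorbis.L.vorbis_deinit.entry Vorbis.Code.code_vorbis_deinit.nat Vorbis.L.vorbis_deinit.size)
    (_h8 : Asan.SmallCheck Lay μ Vorbis.WayInv (Vorbis.CodeOK u₀) [.rax, .rcx, .rdx] 8 Vorbis.L.__asan_load8_noabort.entry)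
    (_h4 : Asan.SmallCheck Lay μ Vorbis.WayInv (Vorbis.CodeOK u₀) [.rax, .rcx, .rdx] 4 Vorbis.L.__asan_load4_noabort.entry)
    (hsf : ∀ (others : List Obj) (frames : List (Nat × FrameLayout)), Calls Lay μ Vorbis.WayInv (Vorbis.conv u₀) Vorbis.L.setup_free.entry (Vorbis.Spec.setup_free.spec others frames))
    (others : List Obj) (frames : List (Nat × FrameLayout)) (Blk : Block → Prop) (e : State) (ret : Word) (v : State)
    (hat : vorbis_deinit.At L.vorbis_deinit.cut3 others frames Blk u₀ e ret v)
    (hi : (v.reg .r12).toNat < 2 ^ 31) :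
    ReachVia Lay μ WayInv v (fun w => vorbis_deinit.At L.vorbis_deinit.cut4 others frames Blk u₀ e ret w ∨
      ((vorbis_deinit.At L.vorbis_deinit.cut3 others frames Blk u₀ e ret w ∧ (w.reg .r12).toNat < 2 ^ 31) ∧
        2 ^ 31 - (w.reg .r12).toNat < 2 ^ 31 - (v.reg .r12).toNat)) := by
  have he := hat.entry
  v_entry he
  obtain ⟨hsh, hok, hlive, hd⟩ := hat.pre
  have hsf' := hsf others frames
  have w_rip := hat.rip
  have c_rsp := hat.rsp
  have c_rbx := hat.rbx
  have w_eq := Vorbis.conv_code_eqOn hat.code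
  have hdf : v.flags .df = false := (show abiInv _ from hat.inv).1
  have hmx : v.mxcsr &&& 0x1F80 = 0x1F80 := (show abiInv _ from hat.inv).2
  have hsse := Vorbis.sseOK_of_abiInv hat.inv
  have hsame := hat.same
  have hob : ObjLive others frames (e.reg .rdi).toNat := ObjLive.of_ob1 hlive hd.ob1
  have hw := hob.where_ hsh.inv hsh.offText (by omega)
  -- the loads
  have r20 : v.mem.readLE (e.reg .rdi + 32) 4 = e.mem.u32 ((e.reg .rdi).toNat + 32) := by
    rw [at_read hat _ _ (by u_omega) (by u_omega)]
    exact rdf32 _ _ _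
  have r28 : v.mem.readLE (e.reg .rdi + 40) 8 = e.mem.u64 ((e.reg .rdi).toNat + 40) := by
    rw [at_read hat _ _ (by u_omega) (by u_omega)]
    exact rdf64 _ _ _
  obtain ⟨cll, e32⟩ : ∃ n, e.mem.u32 ((e.reg .rdi).toNat + 32) = n := ⟨_, rfl⟩
  rw [e32] at r20
  obtain ⟨cl, e64⟩ : ∃ n, e.mem.u64 ((e.reg .rdi).toNat + 40) = n := ⟨_, rfl⟩
  rw [e64] at r28
  have hcll : cll < 2 ^ 32 := by
    rw [← r20]
    exact Mem.readLE_lt' _ _ 4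
  u_walk hcode [hμ.vendor] until [Vorbis.L.vorbis_deinit.cut2, Vorbis.L.vorbis_deinit.cut4] span [Vorbis.L.textLo, Vorbis.L.textHi] side (v_side)
  case check_107618 =>
    -- 0x107618 (4240): `p->comment_list_length`, inside `*p`
    have hun : ShadowUntouched e.mem s_107618.mem := by v_untouched
    exact hob.accSmall hsh.inv hun _ 4 (by decide) (by u_omega) (by u_omega)
  case check_1075ec =>
    -- 0x1075ec (4241): `p->comment_list`, inside `*p`
    have hun : ShadowUntouched e.mem s_1075ec.mem := by v_untouched
    exact hob.accSmall hsh.inv hun _ 8 (by decide) (by u_omega) (by u_omega)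
  case check_1075ff =>
    -- 0x1075ff (4241): `p->comment_list[i]`, `i < comment_list_length`: H1
    have hun : ShadowUntouched e.mem s_1075ff.mem := by v_untouched
    have hlt := (cmp_int _ _ hi hcll).mp hbr_107621
    have hs : Site (Live (stackObjs frames ++ others)) (cl + 8 * (v.reg .r12).toNat) 8 := by
      apply hd.site_comment hlive (v.reg .r12).toNat
      · simp only [vacc, voff]
        rw [Mem.i32_def, e32]
        exact hlt
      · simp only [vacc, voff]
        rw [e64]
    have hwh := site_place hs hsh.inv hsh.offText (by omega)
    refine check_site hsh.inv hun hs ?_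
    exact idx8 _ hi cl (by omega)
  case call_inv =>
    v_inv
  case pre_10760b =>
    have hun : ShadowUntouched e.mem s_10760b.mem := by v_untouched
    refine ⟨hsh.call hun (by u_omega) (by u_omega) (by u_omega), ?_⟩
    rw [w_rdi]
    exact hob
  case check_107627 =>
    -- 0x107627 (4243): `p->comment_list`, inside `*p`
    have hun : ShadowUntouched e.mem s_107627.mem := by v_untouched
    exact hob.accSmall hsh.inv hun _ 8 (by decide) (by u_omega) (by u_omega)
  case call_inv =>
    v_inv
  case pre_107633 =>
    have hun : ShadowUntouched e.mem s_107633.mem := by v_untouched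
    refine ⟨hsh.call hun (by u_omega) (by u_omega) (by u_omega), ?_⟩
    rw [w_rdi]
    exact hob
  case cont =>
    -- 0x107610 = cut2 (4240): after `setup_free(p, p->comment_list[i])`; `add r12d, 1` and back to the head
    v_after_call w_rsp_10760b w_mem_10760b
    have hlt := (cmp_int _ _ hi hcll).mp hbr_107621
    u_walk hcode [hμ.vendor] until [Vorbis.L.vorbis_deinit.cut3] span [Vorbis.L.textLo, Vorbis.L.textHi] side (v_side)
    have hs : Mem.SameExcept [⟨(e.reg .rsp).toNat - 96, (e.reg .rsp).toNat - 40⟩] v.mem s_107610.mem := by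
      u_same
    have hn := next32 (v.reg .r12) hi
    rw [← w_r12] at hn
    have hc := sint32_cases cll
    refine ReachVia.done (Or.inr ⟨⟨at_next hat hs w_rip w_rsp (by rw [w_kept .rbx rfl]; exact c_rbx) (w_kept .r15 rfl) (Vorbis.conv_code_in w_eq) ?_, ?_⟩, ?_⟩)
    · v_inv
    · omega
    · omega
  case cont =>
    -- 0x107638 = cut4 (4245): after `setup_free(p, p->comment_list)`
    v_after_call w_rsp_107633 w_mem_107633
    have hs : Mem.SameExcept [⟨(e.reg .rsp).toNat - 96, (e.reg .rsp).toNat - 40⟩] v.mem s_107633r.mem := by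
      u_same
    exact ReachVia.done (Or.inl (at_next hat hs w_rip w_rsp (by rw [w_kept .rbx rfl]; exact c_rbx) (w_kept .r15 rfl) w_code w_inv))

/-- **The comment loop** (4240 – 4243), from its head cut3 = 0x107614 to cut4 = 0x107638: `ReachVia.loop` over `loop1_body`;
invariant `At cut3 ∧ i = r12 < 2^31`, measure `2^31 − i`. -/
theorem comment_loop {Lay : Layout} (hLay : Lay.hi = 0x1000000) {μ : Microarch} (hμ : UserX.MicroOK μ) {u₀ : State}
    (hcode : HasCodeNat Lay u₀ Vorbis.L.vorbis_deinit.entry Vorbis.Code.code_vorbis_deinit.nat Vorbis.L.vorbis_deinit.size)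
    (h8 : Asan.SmallCheck Lay μ Vorbis.WayInv (Vorbis.CodeOK u₀) [.rax, .rcx, .rdx] 8 Vorbis.L.__asan_load8_noabort.entry)
    (h4 : Asan.SmallCheck Lay μ Vorbis.WayInv (Vorbis.CodeOK u₀) [.rax, .rcx, .rdx] 4 Vorbis.L.__asan_load4_noabort.entry)
    (_h1 : Asan.SmallCheck Lay μ Vorbis.WayInv (Vorbis.CodeOK u₀) [.rax, .rdx] 1 Vorbis.L.__asan_load1_noabort.entry)
    (hsf : ∀ (others : List Obj) (frames : List (Nat × FrameLayout)), Calls Lay μ Vorbis.WayInv (Vorbis.conv u₀) Vorbis.L.setup_free.entry (Vorbis.Spec.setup_free.spec others frames))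
    (others : List Obj) (frames : List (Nat × FrameLayout)) (Blk : Block → Prop) (e : State) (ret : Word) (v : State)
    (hat : vorbis_deinit.At L.vorbis_deinit.cut3 others frames Blk u₀ e ret v) (hi : (v.reg .r12).toNat < 2 ^ 31) :
    ReachVia Lay μ WayInv v (vorbis_deinit.At L.vorbis_deinit.cut4 others frames Blk u₀ e ret) :=
  ReachVia.loop
    (Inv := fun x => vorbis_deinit.At L.vorbis_deinit.cut3 others frames Blk u₀ e ret x ∧ (x.reg .r12).toNat < 2 ^ 31)
    (fun x => 2 ^ 31 - (x.reg .r12).toNat)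
    (fun x hx => loop1_body hLay hμ hcode h8 h4 hsf others frames Blk e ret x hx.1 hx.2)
    v ⟨hat, hi⟩

/-- cut4 = 0x107638 (4245 – 4246): `if (p->residue_config)`: NULL leaves the segment (cut10 = 0x107745), otherwise `i = 0` and
to the head of the residue loop (cut9 = 0x1076f9). -/
theorem to_loop3 {Lay : Layout} (hLay : Lay.hi = 0x1000000) {μ : Microarch} (hμ : UserX.MicroOK μ) {u₀ : State}
    (hcode : HasCodeNat Lay u₀ Vorbis.L.vorbis_deinit.entry Vorbis.Code.code_vorbis_deinit.nat Vorbis.L.vorbis_deinit.size)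
    (_h8 : Asan.SmallCheck Lay μ Vorbis.WayInv (Vorbis.CodeOK u₀) [.rax, .rcx, .rdx] 8 Vorbis.L.__asan_load8_noabort.entry)
    (_h4 : Asan.SmallCheck Lay μ Vorbis.WayInv (Vorbis.CodeOK u₀) [.rax, .rcx, .rdx] 4 Vorbis.L.__asan_load4_noabort.entry)
    (_h1 : Asan.SmallCheck Lay μ Vorbis.WayInv (Vorbis.CodeOK u₀) [.rax, .rdx] 1 Vorbis.L.__asan_load1_noabort.entry)
    (hsf : ∀ (others : List Obj) (frames : List (Nat × FrameLayout)), Calls Lay μ Vorbis.WayInv (Vorbis.conv u₀) Vorbis.L.setup_free.entry (Vorbis.Spec.setup_free.spec others frames))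
    (others : List Obj) (frames : List (Nat × FrameLayout)) (Blk : Block → Prop) (e : State) (ret : Word) (v : State)
    (hat : vorbis_deinit.At L.vorbis_deinit.cut4 others frames Blk u₀ e ret v) :
    ReachVia Lay μ WayInv v (fun w => vorbis_deinit.At L.vorbis_deinit.cut10 others frames Blk u₀ e ret w ∨
      (vorbis_deinit.At L.vorbis_deinit.cut9 others frames Blk u₀ e ret w ∧ (w.reg .r14).toNat < 2 ^ 31 ∧ e.mem.u64 ((e.reg .rdi).toNat + 456) ≠ 0)) := by
  have he := hat.entry
  v_entry he
  obtain ⟨hsh, hok, hlive, hd⟩ := hat.pre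
  have hsf' := hsf others frames
  have w_rip := hat.rip
  have c_rsp := hat.rsp
  have c_rbx := hat.rbx
  have w_eq := Vorbis.conv_code_eqOn hat.code
  have hdf : v.flags .df = false := (show abiInv _ from hat.inv).1
  have hmx : v.mxcsr &&& 0x1F80 = 0x1F80 := (show abiInv _ from hat.inv).2
  have hsse := Vorbis.sseOK_of_abiInv hat.inv
  have hsame := hat.same
  have hob : ObjLive others frames (e.reg .rdi).toNat := ObjLive.of_ob1 hlive hd.ob1
  have hw := hob.where_ hsh.inv hsh.offText (by omega)
  have r1c8 : v.mem.readLE (e.reg .rdi + 456) 8 = e.mem.u64 ((e.reg .rdi).toNat + 456) := by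
    rw [at_read hat _ _ (by u_omega) (by u_omega)]
    exact rdf64 _ _ _
  obtain ⟨rc, e456⟩ : ∃ n, e.mem.u64 ((e.reg .rdi).toNat + 456) = n := ⟨_, rfl⟩
  rw [e456] at r1c8
  u_walk hcode [hμ.vendor] until [Vorbis.L.vorbis_deinit.cut9, Vorbis.L.vorbis_deinit.cut10] span [Vorbis.L.textLo, Vorbis.L.textHi] side (v_side)
  case check_10763f =>
    -- 0x10763f (4245): `p->residue_config`, inside `*p`
    have hun : ShadowUntouched e.mem s_10763f.mem := by v_untouched
    exact hob.accSmall hsh.inv hun _ 8 (by decide) (by u_omega) (by u_omega)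
  case cont =>
    -- `residue_config = NULL`: cut10
    have hs : Mem.SameExcept [⟨(e.reg .rsp).toNat - 96, (e.reg .rsp).toNat - 40⟩] v.mem s_10764c.mem := by
      u_same
    refine ReachVia.done (Or.inl (at_next hat hs w_rip w_rsp (by rw [w_kept .rbx rfl]; exact c_rbx) (w_kept .r15 rfl) (Vorbis.conv_code_in w_eq) ?_))
    v_inv
  case cont =>
    -- `residue_config ≠ NULL`: `i = 0`, the head of the residue loop
    have hs : Mem.SameExcept [⟨(e.reg .rsp).toNat - 96, (e.reg .rsp).toNat - 40⟩] v.mem s_107658.mem := by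
      u_same
    have hrc : rc < 2 ^ 64 := by
      rw [← e456]
      exact Mem.u64_lt _ _
    refine ReachVia.done (Or.inr ⟨at_next hat hs w_rip w_rsp (by rw [w_kept .rbx rfl]; exact c_rbx) (w_kept .r15 rfl) (Vorbis.conv_code_in w_eq) ?_, ?_, ?_⟩)
    · v_inv
    · rw [w_r14]
      decide
    · omega

/-- The head of the residue loop, cut9 = 0x1076f9 (4246 – 4249): out of the segment when `i ≥ residue_count` (cut10), else
`r = residue_config + i` and `if (r->classdata)`: NULL goes to cut7 = 0x1076de, otherwise `j = 0` and to the head of the class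
loop (cut6 = 0x10768b). -/
theorem res_head {Lay : Layout} (hLay : Lay.hi = 0x1000000) {μ : Microarch} (hμ : UserX.MicroOK μ) {u₀ : State}
    (hcode : HasCodeNat Lay u₀ Vorbis.L.vorbis_deinit.entry Vorbis.Code.code_vorbis_deinit.nat Vorbis.L.vorbis_deinit.size)
    (_h8 : Asan.SmallCheck Lay μ Vorbis.WayInv (Vorbis.CodeOK u₀) [.rax, .rcx, .rdx] 8 Vorbis.L.__asan_load8_noabort.entry)
    (_h4 : Asan.SmallCheck Lay μ Vorbis.WayInv (Vorbis.CodeOK u₀) [.rax, .rcx, .rdx] 4 Vorbis.L.__asan_load4_noabort.entry)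
    (_h1 : Asan.SmallCheck Lay μ Vorbis.WayInv (Vorbis.CodeOK u₀) [.rax, .rdx] 1 Vorbis.L.__asan_load1_noabort.entry)
    (hsf : ∀ (others : List Obj) (frames : List (Nat × FrameLayout)), Calls Lay μ Vorbis.WayInv (Vorbis.conv u₀) Vorbis.L.setup_free.entry (Vorbis.Spec.setup_free.spec others frames))
    (others : List Obj) (frames : List (Nat × FrameLayout)) (Blk : Block → Prop) (e : State) (ret : Word) (v : State)
    (hat : vorbis_deinit.At L.vorbis_deinit.cut9 others frames Blk u₀ e ret v) (hi31 : (v.reg .r14).toNat < 2 ^ 31)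
    (hnz : e.mem.u64 ((e.reg .rdi).toNat + 456) ≠ 0) :
    ReachVia Lay μ WayInv v (fun w => vorbis_deinit.At L.vorbis_deinit.cut10 others frames Blk u₀ e ret w ∨
      (vorbis_deinit.At L.vorbis_deinit.cut7 others frames Blk u₀ e ret w ∧ (w.reg .r14).toNat = (v.reg .r14).toNat ∧
        ((v.reg .r14).toNat : Int) < sint32 (e.mem.u32 ((e.reg .rdi).toNat + 320)) ∧
        (w.reg .r12).toNat = e.mem.u64 ((e.reg .rdi).toNat + 456) + 32 * (v.reg .r14).toNat) ∨
      (vorbis_deinit.At L.vorbis_deinit.cut6 others frames Blk u₀ e ret w ∧ (w.reg .r14).toNat = (v.reg .r14).toNat ∧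
        ((v.reg .r14).toNat : Int) < sint32 (e.mem.u32 ((e.reg .rdi).toNat + 320)) ∧
        (w.reg .r12).toNat = e.mem.u64 ((e.reg .rdi).toNat + 456) + 32 * (v.reg .r14).toNat ∧
        (w.reg .r13).toNat < 2 ^ 31 ∧
        e.mem.u64 (e.mem.u64 ((e.reg .rdi).toNat + 456) + 32 * (v.reg .r14).toNat + 16) ≠ 0)) := by
  have he := hat.entry
  v_entry he
  obtain ⟨hsh, hok, hlive, hd⟩ := hat.pre
  have hsf' := hsf others frames
  have w_rip := hat.rip
  have c_rsp := hat.rsp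
  have c_rbx := hat.rbx
  have w_eq := Vorbis.conv_code_eqOn hat.code
  have hdf : v.flags .df = false := (show abiInv _ from hat.inv).1
  have hmx : v.mxcsr &&& 0x1F80 = 0x1F80 := (show abiInv _ from hat.inv).2
  have hsse := Vorbis.sseOK_of_abiInv hat.inv
  have hsame := hat.same
  have hob : ObjLive others frames (e.reg .rdi).toNat := ObjLive.of_ob1 hlive hd.ob1
  have hw := hob.where_ hsh.inv hsh.offText (by omega)
  have hsite : ((v.reg .r14).toNat : Int) < sint32 (e.mem.u32 ((e.reg .rdi).toNat + 320)) →
      Site (Live (stackObjs frames ++ others)) (e.mem.u64 ((e.reg .rdi).toNat + 456) + 32 * (v.reg .r14).toNat + 16) 8 := by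
    intro hilt
    apply hd.site_residue hlive (by simp only [vacc, voff]; exact hnz) _ (by simp only [vacc, voff]; exact hilt) 16 8
      (by simp only [voff]; omega) (by omega)
    simp only [vacc, voff]
  have r140 : v.mem.readLE (e.reg .rdi + 320) 4 = e.mem.u32 ((e.reg .rdi).toNat + 320) := by
    rw [at_read hat _ _ (by u_omega) (by u_omega)]
    exact rdf32 _ _ _
  obtain ⟨rcnt, e320⟩ : ∃ n, e.mem.u32 ((e.reg .rdi).toNat + 320) = n := ⟨_, rfl⟩
  rw [e320] at r140
  have r1c8 : v.mem.readLE (e.reg .rdi + 456) 8 = e.mem.u64 ((e.reg .rdi).toNat + 456) := by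
    rw [at_read hat _ _ (by u_omega) (by u_omega)]
    exact rdf64 _ _ _
  obtain ⟨rc, e456⟩ : ∃ n, e.mem.u64 ((e.reg .rdi).toNat + 456) = n := ⟨_, rfl⟩
  rw [e456] at r1c8
  rw [e320, e456] at hsite
  rw [e456] at hnz
  rw [e320, e456]
  have hrcnt : rcnt < 2 ^ 32 := by
    rw [← e320]
    exact Mem.u32_lt _ _
  u_walk hcode [hμ.vendor] until [Vorbis.L.vorbis_deinit.cut6, Vorbis.L.vorbis_deinit.cut7, Vorbis.L.vorbis_deinit.cut10] span [Vorbis.L.textLo, Vorbis.L.textHi] side (v_side)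
  case check_107700 =>
    -- 0x107700 (4246): `p->residue_count`, inside `*p`
    have hun : ShadowUntouched e.mem s_107700.mem := by v_untouched
    exact hob.accSmall hsh.inv hun _ 4 (by decide) (by u_omega) (by u_omega)
  case check_107715 =>
    -- 0x107715 (4247): `p->residue_config`, inside `*p`
    have hun : ShadowUntouched e.mem s_107715.mem := by v_untouched
    exact hob.accSmall hsh.inv hun _ 8 (by decide) (by u_omega) (by u_omega)
  case check_10772d =>
    -- 0x10772d (4248): `r->classdata`, in `residue_config[i]`, `i < residue_count`: H2
    have hun : ShadowUntouched e.mem s_10772d.mem := by v_untouched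
    rw [toInt_ofNat32 rcnt hrcnt, part_toInt _ hi31] at hbr_10770c
    have hs := hsite (by omega)
    have hwr := site_place hs hsh.inv hsh.offText (by omega)
    have h12 := idx32 (v.reg .r14) hi31 rc (by omega)
    refine check_site hsh.inv hun hs ?_
    clear hw hsite hs
    u_omega
  case cont =>
    -- `i ≥ residue_count`: the loop is done, cut10
    have hs : Mem.SameExcept [⟨(e.reg .rsp).toNat - 96, (e.reg .rsp).toNat - 40⟩] v.mem s_10770c.mem := by
      u_same
    refine ReachVia.done (Or.inl (at_next hat hs w_rip w_rsp (by rw [w_kept .rbx rfl]; exact c_rbx) (w_kept .r15 rfl) (Vorbis.conv_code_in w_eq) ?_))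
    v_inv
  case cont =>
    -- `r->classdata = NULL`: cut7
    have hs : Mem.SameExcept [⟨(e.reg .rsp).toNat - 96, (e.reg .rsp).toNat - 40⟩] v.mem s_107738.mem := by
      u_same
    rw [toInt_ofNat32 rcnt hrcnt, part_toInt _ hi31] at hbr_10770c
    have hst := hsite (by omega)
    have hwr := site_place hst hsh.inv hsh.offText (by omega)
    have h12 := idx32 (v.reg .r14) hi31 rc (by omega)
    rw [← w_r12] at h12
    refine ReachVia.done (Or.inr (Or.inl ⟨at_next hat hs w_rip w_rsp (by rw [w_kept .rbx rfl]; exact c_rbx) (w_kept .r15 rfl) (Vorbis.conv_code_in w_eq) ?_, congrArg UInt64.toNat (w_kept .r14 rfl), by omega, h12⟩))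
    v_inv
  case cont =>
    -- `r->classdata ≠ NULL`: `j = 0`, the head of the class loop, cut6
    have hs : Mem.SameExcept [⟨(e.reg .rsp).toNat - 96, (e.reg .rsp).toNat - 40⟩] v.mem s_107740.mem := by
      u_same
    rw [toInt_ofNat32 rcnt hrcnt, part_toInt _ hi31] at hbr_10770c
    have hst := hsite (by omega)
    have hwr := site_place hst hsh.inv hsh.offText (by omega)
    have h12 := idx32 (v.reg .r14) hi31 rc (by omega)
    have h16 : (Word.ofBV (BitVec.signExtend 64 (Word.part Width.w32 (v.reg .r14))) <<< (5 : Word) + UInt64.ofNat rc + 16).toNat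
        = rc + 32 * (v.reg .r14).toNat + 16 := by
      clear hw hsite hst hbr_107738
      u_omega
    rw [rd_through hat _ _ 8 _ h16 (by omega) (by omega)] at hbr_107738
    rw [← w_r12] at h12
    refine ReachVia.done (Or.inr (Or.inr ⟨at_next hat hs w_rip w_rsp (by rw [w_kept .rbx rfl]; exact c_rbx) (w_kept .r15 rfl) (Vorbis.conv_code_in w_eq) ?_, congrArg UInt64.toNat (w_kept .r14 rfl), by omega, h12, ?_, ?_⟩))
    · v_inv
    · rw [w_r13]
      decide
    · have hlt := Mem.u64_lt e.mem (rc + 32 * (v.reg .r14).toNat + 16)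
      unfold Mem.u64 at hlt ⊢
      omega

set_option maxHeartbeats 16000000 in
/-- One round of the class loop from its head cut6 = 0x10768b (4249 – 4251), inside residue `i` with `r->classdata ≠ NULL`: while
`j < p->codebooks[r->classbook].entries`, `setup_free(p, r->classdata[j])` and back to the head with `j + 1`; else
`setup_free(p, r->classdata)` and on to cut7 = 0x1076de. -/
theorem class_body {Lay : Layout} (hLay : Lay.hi = 0x1000000) {μ : Microarch} (hμ : UserX.MicroOK μ) {u₀ : State}
    (hcode : HasCodeNat Lay u₀ Vorbis.L.vorbis_deinit.entry Vorbis.Code.code_vorbis_deinit.nat Vorbis.L.vorbis_deinit.size)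
    (_h8 : Asan.SmallCheck Lay μ Vorbis.WayInv (Vorbis.CodeOK u₀) [.rax, .rcx, .rdx] 8 Vorbis.L.__asan_load8_noabort.entry)
    (_h4 : Asan.SmallCheck Lay μ Vorbis.WayInv (Vorbis.CodeOK u₀) [.rax, .rcx, .rdx] 4 Vorbis.L.__asan_load4_noabort.entry)
    (_h1 : Asan.SmallCheck Lay μ Vorbis.WayInv (Vorbis.CodeOK u₀) [.rax, .rdx] 1 Vorbis.L.__asan_load1_noabort.entry)
    (hsf : ∀ (others : List Obj) (frames : List (Nat × FrameLayout)), Calls Lay μ Vorbis.WayInv (Vorbis.conv u₀) Vorbis.L.setup_free.entry (Vorbis.Spec.setup_free.spec others frames))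
    (others : List Obj) (frames : List (Nat × FrameLayout)) (Blk : Block → Prop) (e : State) (ret : Word) (v : State)
    (hat : vorbis_deinit.At L.vorbis_deinit.cut6 others frames Blk u₀ e ret v) (i : Nat) (_hi31 : i < 2 ^ 31) (hr14 : (v.reg .r14).toNat = i)
    (hilt : (i : Int) < sint32 (e.mem.u32 ((e.reg .rdi).toNat + 320)))
    (hnz : e.mem.u64 ((e.reg .rdi).toNat + 456) ≠ 0)
    (hr12 : (v.reg .r12).toNat = e.mem.u64 ((e.reg .rdi).toNat + 456) + 32 * i)
    (hj31 : (v.reg .r13).toNat < 2 ^ 31)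
    (hcd : e.mem.u64 (e.mem.u64 ((e.reg .rdi).toNat + 456) + 32 * i + 16) ≠ 0) :
    ReachVia Lay μ WayInv v (fun w =>
      (vorbis_deinit.At L.vorbis_deinit.cut7 others frames Blk u₀ e ret w ∧ (w.reg .r14).toNat = i ∧
        (w.reg .r12).toNat = e.mem.u64 ((e.reg .rdi).toNat + 456) + 32 * i) ∨
      ((vorbis_deinit.At L.vorbis_deinit.cut6 others frames Blk u₀ e ret w ∧ (w.reg .r14).toNat = i ∧
        (w.reg .r12).toNat = e.mem.u64 ((e.reg .rdi).toNat + 456) + 32 * i ∧ (w.reg .r13).toNat < 2 ^ 31) ∧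
        2 ^ 31 - (w.reg .r13).toNat < 2 ^ 31 - (v.reg .r13).toNat)) := by
  have he := hat.entry
  v_entry he
  obtain ⟨hsh, hok, hlive, hd⟩ := hat.pre
  have hsf' := hsf others frames
  have w_rip := hat.rip
  have c_rsp := hat.rsp
  have c_rbx := hat.rbx
  have w_eq := Vorbis.conv_code_eqOn hat.code
  have hdf : v.flags .df = false := (show abiInv _ from hat.inv).1
  have hmx : v.mxcsr &&& 0x1F80 = 0x1F80 := (show abiInv _ from hat.inv).2
  have hsse := Vorbis.sseOK_of_abiInv hat.inv
  have hsame := hat.same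
  have hob : ObjLive others frames (e.reg .rdi).toNat := ObjLive.of_ob1 hlive hd.ob1
  have hw := hob.where_ hsh.inv hsh.offText (by omega)
  have hnz' : stb_vorbis.residue_config e.mem (e.reg .rdi).toNat ≠ 0 := by
    simp only [vacc, voff]
    exact hnz
  have hilt' : (i : Int) < stb_vorbis.residue_count e.mem (e.reg .rdi).toNat := by
    simp only [vacc, voff]
    exact hilt
  have hcd' : Residue.classdata e.mem (stb_vorbis.residue_config_at e.mem (e.reg .rdi).toNat i) ≠ 0 := by
    simp only [vacc, voff]
    exact hcd
  -- the sites of residue `i`: `classbook` (+13), `classdata` (+16)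
  have hs13 : Site (Live (stackObjs frames ++ others)) (e.mem.u64 ((e.reg .rdi).toNat + 456) + 32 * i + 13) 1 := by
    apply hd.site_residue hlive hnz' i hilt' 13 1 (by simp only [voff]; omega) (by omega)
    simp only [vacc, voff]
  have hs16 : Site (Live (stackObjs frames ++ others)) (e.mem.u64 ((e.reg .rdi).toNat + 456) + 32 * i + 16) 8 := by
    apply hd.site_residue hlive hnz' i hilt' 16 8 (by simp only [voff]; omega) (by omega)
    simp only [vacc, voff]
  -- `codebooks[classbook].entries` (H3 + H4) and `classdata[j]` (H3)
  have hsE := hd.site_entries hlive hnz' i hilt' hcd' rfl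
  have hsJ := fun j hj => hd.site_classdata hlive hnz' i hilt' hcd' j hj rfl
  simp only [vacc, voff] at hsE hsJ
  have hsR : Site (Live (stackObjs frames ++ others)) (e.mem.u64 ((e.reg .rdi).toNat + 456) + 32 * i + 0) 32 := by
    apply hd.site_residue hlive hnz' i hilt' 0 32 (by simp only [voff]; omega) (by omega)
    simp only [vacc, voff]
  have hwR := site_off hsR hsh.inv hsh.offText he_room he_top
  have hwE := site_off hsE hsh.inv hsh.offText he_room he_top
  clear hsR
  have ra8 : v.mem.readLE (e.reg .rdi + 168) 8 = e.mem.u64 ((e.reg .rdi).toNat + 168) := by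
    rw [at_read hat _ _ (by u_omega) (by u_omega)]
    exact rdf64 _ _ _
  obtain ⟨cb, e168⟩ : ∃ n, e.mem.u64 ((e.reg .rdi).toNat + 168) = n := ⟨_, rfl⟩
  rw [e168] at ra8
  have rd13 : v.mem.readLE (v.reg .r12 + 13) 1 = e.mem.u8 ((v.reg .r12).toNat + 13) := by
    rw [at_read hat _ _ (by u_omega) (by u_omega)]
    exact rdf8 _ _ _
  have rd16 : v.mem.readLE (v.reg .r12 + 16) 8 = e.mem.u64 ((v.reg .r12).toNat + 16) := by
    rw [at_read hat _ _ (by u_omega) (by u_omega)]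
    exact rdf64 _ _ _
  rw [hr12] at rd13 rd16
  obtain ⟨rc, e456⟩ : ∃ n, e.mem.u64 ((e.reg .rdi).toNat + 456) = n := ⟨_, rfl⟩
  rw [e456] at hs13 hs16 hsE hsJ hwR hwE hr12 rd13 rd16 hcd
  rw [e456]
  obtain ⟨bk, e13⟩ : ∃ n, e.mem.u8 (rc + 32 * i + 13) = n := ⟨_, rfl⟩
  obtain ⟨cd, e16⟩ : ∃ n, e.mem.u64 (rc + 32 * i + 16) = n := ⟨_, rfl⟩
  rw [e13] at hsE hsJ hwE rd13
  rw [e16] at hsJ rd16 hcd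
  rw [e168] at hsE hsJ hwE
  have hbk : bk < 256 := by
    rw [← e13]
    exact Mem.u8_lt _ _
  have haE := idxbook cb bk hbk (by omega)
  obtain ⟨En, eE⟩ : ∃ n, e.mem.u32 (cb + 2120 * bk + 4) = n := ⟨_, rfl⟩
  have hEn : En < 2 ^ 32 := by
    rw [← eE]
    exact Mem.u32_lt _ _
  rw [Mem.i32_def, eE] at hsJ
  have hrdE : ∀ c, (v.mem.writeLE (e.reg .rsp - 48) 8 c).readLE (UInt64.ofNat cb +
      Word.ofBV (BitVec.setWidth 64 (BitVec.zeroExtend 32 (BitVec.ofNat 8 bk))) * (2120 : Word) + (4 : Word)) 4 = En := by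
    intro c
    rw [rd_through hat _ c 4 _ haE (by omega) (by omega), ← eE]
    unfold Mem.u32
    exact rfl
  clear hwE
  u_walk hcode [hμ.vendor] until [Vorbis.L.vorbis_deinit.cut5, Vorbis.L.vorbis_deinit.cut7] span [Vorbis.L.textLo, Vorbis.L.textHi] side (v_side)
  case check_107692 =>
    -- 0x107692 (4249): `p->codebooks`, inside `*p`
    have hun : ShadowUntouched e.mem s_107692.mem := by v_untouched
    exact hob.accSmall hsh.inv hun _ 8 (by decide) (by u_omega) (by u_omega)
  case check_1076a3 =>
    -- 0x1076a3 (4249): `r->classbook`, in `residue_config[i]`: H2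
    have hun : ShadowUntouched e.mem s_1076a3.mem := by v_untouched
    exact check_site hsh.inv hun hs13 (by u_omega)
  case check_1076bc =>
    -- 0x1076bc (4249): `p->codebooks[r->classbook].entries`: H3 + H4
    have hun : ShadowUntouched e.mem s_1076bc.mem := by v_untouched
    exact check_site hsh.inv hun hsE haE
  case check_107662 =>
    -- 0x107662 (4250): `r->classdata`, in `residue_config[i]`: H2
    have hun : ShadowUntouched e.mem s_107662.mem := by v_untouched
    exact check_site hsh.inv hun hs16 (by u_omega)
  case check_107676 =>
    -- 0x107676 (4250): `r->classdata[j]`, `j < entries`: H3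
    have hun : ShadowUntouched e.mem s_107676.mem := by v_untouched
    rw [hrdE, toInt_ofNat32 En hEn, part_toInt _ hj31] at hbr_1076c5
    have hs := hsJ (v.reg .r13).toNat hbr_1076c5
    have hwJ := site_off hs hsh.inv hsh.offText he_room he_top
    exact check_site hsh.inv hun hs (idx8 _ hj31 cd (by omega))
  case call_inv =>
    v_inv
  case pre_107682 =>
    have hun : ShadowUntouched e.mem s_107682.mem := by v_untouched
    refine ⟨hsh.call hun (by u_omega) (by u_omega) (by u_omega), ?_⟩
    rw [w_rdi]
    exact hob
  case check_1076cc =>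
    -- 0x1076cc (4251): `r->classdata`, in `residue_config[i]`: H2
    have hun : ShadowUntouched e.mem s_1076cc.mem := by v_untouched
    exact check_site hsh.inv hun hs16 (by u_omega)
  case call_inv =>
    v_inv
  case pre_1076d9 =>
    have hun : ShadowUntouched e.mem s_1076d9.mem := by v_untouched
    refine ⟨hsh.call hun (by u_omega) (by u_omega) (by u_omega), ?_⟩
    rw [w_rdi]
    exact hob
  case cont =>
    -- 0x107687 = cut5 (4249): after `setup_free(p, r->classdata[j])`; `add r13d, 1` and back to the head
    v_after_call w_rsp_107682 w_mem_107682
    rw [hrdE, toInt_ofNat32 En hEn, part_toInt _ hj31] at hbr_1076c5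
    u_walk hcode [hμ.vendor] until [Vorbis.L.vorbis_deinit.cut6] span [Vorbis.L.textLo, Vorbis.L.textHi] side (v_side)
    have hs : Mem.SameExcept [⟨(e.reg .rsp).toNat - 96, (e.reg .rsp).toNat - 40⟩] v.mem s_107687.mem := by
      u_same
    have hn := next32 (v.reg .r13) hj31
    rw [← w_r13] at hn
    have hc := sint32_cases En
    refine ReachVia.done (Or.inr ⟨⟨at_next hat hs w_rip w_rsp (by rw [w_kept .rbx rfl]; exact c_rbx) (w_kept .r15 rfl) (Vorbis.conv_code_in w_eq) ?_, ?_, ?_, ?_⟩, ?_⟩)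
    · v_inv
    · rw [w_kept .r14 rfl]
      exact hr14
    · rw [w_kept .r12 rfl]
      exact hr12
    · omega
    · omega
  case cont =>
    -- 0x1076de = cut7 (4253): after `setup_free(p, r->classdata)`
    v_after_call w_rsp_1076d9 w_mem_1076d9
    have hs : Mem.SameExcept [⟨(e.reg .rsp).toNat - 96, (e.reg .rsp).toNat - 40⟩] v.mem s_1076d9r.mem := by
      u_same
    refine ReachVia.done (Or.inl ⟨at_next hat hs w_rip w_rsp (by rw [w_kept .rbx rfl]; exact c_rbx) (w_kept .r15 rfl) w_code w_inv, ?_, ?_⟩)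
    · rw [w_kept .r14 rfl]
      exact hr14
    · rw [w_kept .r12 rfl]
      exact hr12

/-- **The class loop** (4249 – 4251) of residue `i`, from its head cut6 = 0x10768b to cut7 = 0x1076de: `ReachVia.loop` over
`class_body`; invariant `At cut6 ∧ r14 = i ∧ r12 = residue_config + 32·i ∧ j = r13 < 2^31`, measure `2^31 − j`. -/
theorem class_loop {Lay : Layout} (hLay : Lay.hi = 0x1000000) {μ : Microarch} (hμ : UserX.MicroOK μ) {u₀ : State}
    (hcode : HasCodeNat Lay u₀ Vorbis.L.vorbis_deinit.entry Vorbis.Code.code_vorbis_deinit.nat Vorbis.L.vorbis_deinit.size)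
    (h8 : Asan.SmallCheck Lay μ Vorbis.WayInv (Vorbis.CodeOK u₀) [.rax, .rcx, .rdx] 8 Vorbis.L.__asan_load8_noabort.entry)
    (h4 : Asan.SmallCheck Lay μ Vorbis.WayInv (Vorbis.CodeOK u₀) [.rax, .rcx, .rdx] 4 Vorbis.L.__asan_load4_noabort.entry)
    (h1 : Asan.SmallCheck Lay μ Vorbis.WayInv (Vorbis.CodeOK u₀) [.rax, .rdx] 1 Vorbis.L.__asan_load1_noabort.entry)
    (hsf : ∀ (others : List Obj) (frames : List (Nat × FrameLayout)), Calls Lay μ Vorbis.WayInv (Vorbis.conv u₀) Vorbis.L.setup_free.entry (Vorbis.Spec.setup_free.spec others frames))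
    (others : List Obj) (frames : List (Nat × FrameLayout)) (Blk : Block → Prop) (e : State) (ret : Word) (v : State)
    (hat : vorbis_deinit.At L.vorbis_deinit.cut6 others frames Blk u₀ e ret v) (i : Nat) (hi31 : i < 2 ^ 31) (hr14 : (v.reg .r14).toNat = i)
    (hilt : (i : Int) < sint32 (e.mem.u32 ((e.reg .rdi).toNat + 320)))
    (hnz : e.mem.u64 ((e.reg .rdi).toNat + 456) ≠ 0)
    (hr12 : (v.reg .r12).toNat = e.mem.u64 ((e.reg .rdi).toNat + 456) + 32 * i)
    (hj31 : (v.reg .r13).toNat < 2 ^ 31)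
    (hcd : e.mem.u64 (e.mem.u64 ((e.reg .rdi).toNat + 456) + 32 * i + 16) ≠ 0) :
    ReachVia Lay μ WayInv v (fun w => vorbis_deinit.At L.vorbis_deinit.cut7 others frames Blk u₀ e ret w ∧ (w.reg .r14).toNat = i ∧ (w.reg .r12).toNat = e.mem.u64 ((e.reg .rdi).toNat + 456) + 32 * i) :=
  ReachVia.loop
    (Inv := fun w => vorbis_deinit.At L.vorbis_deinit.cut6 others frames Blk u₀ e ret w ∧ (w.reg .r14).toNat = i ∧
      (w.reg .r12).toNat = e.mem.u64 ((e.reg .rdi).toNat + 456) + 32 * i ∧ (w.reg .r13).toNat < 2 ^ 31)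
    (fun x => 2 ^ 31 - (x.reg .r13).toNat)
    (fun x hx => class_body hLay hμ hcode h8 h4 h1 hsf others frames Blk e ret x hx.1 i hi31 hx.2.1 hilt hnz hx.2.2.1
      hx.2.2.2 hcd)
    v ⟨hat, hr14, hr12, hj31⟩

/-- cut7 = 0x1076de … cut9 = 0x1076f9 (4253, 4246): `setup_free(p, r->residue_books)`, `++i`, back to the head of the residue loop.
`r12 = r = residue_config + 32·i`, `r14 = i < residue_count`. -/
theorem res_tail {Lay : Layout} (hLay : Lay.hi = 0x1000000) {μ : Microarch} (hμ : UserX.MicroOK μ) {u₀ : State}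
    (hcode : HasCodeNat Lay u₀ Vorbis.L.vorbis_deinit.entry Vorbis.Code.code_vorbis_deinit.nat Vorbis.L.vorbis_deinit.size)
    (_h8 : Asan.SmallCheck Lay μ Vorbis.WayInv (Vorbis.CodeOK u₀) [.rax, .rcx, .rdx] 8 Vorbis.L.__asan_load8_noabort.entry)
    (_h4 : Asan.SmallCheck Lay μ Vorbis.WayInv (Vorbis.CodeOK u₀) [.rax, .rcx, .rdx] 4 Vorbis.L.__asan_load4_noabort.entry)
    (_h1 : Asan.SmallCheck Lay μ Vorbis.WayInv (Vorbis.CodeOK u₀) [.rax, .rdx] 1 Vorbis.L.__asan_load1_noabort.entry)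
    (hsf : ∀ (others : List Obj) (frames : List (Nat × FrameLayout)), Calls Lay μ Vorbis.WayInv (Vorbis.conv u₀) Vorbis.L.setup_free.entry (Vorbis.Spec.setup_free.spec others frames))
    (others : List Obj) (frames : List (Nat × FrameLayout)) (Blk : Block → Prop) (e : State) (ret : Word) (v : State)
    (hat : vorbis_deinit.At L.vorbis_deinit.cut7 others frames Blk u₀ e ret v) (i : Nat) (hi31 : i < 2 ^ 31) (hr14 : (v.reg .r14).toNat = i)
    (hilt : (i : Int) < sint32 (e.mem.u32 ((e.reg .rdi).toNat + 320)))
    (hnz : e.mem.u64 ((e.reg .rdi).toNat + 456) ≠ 0)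
    (hr12 : (v.reg .r12).toNat = e.mem.u64 ((e.reg .rdi).toNat + 456) + 32 * i) :
    ReachVia Lay μ WayInv v (fun w => vorbis_deinit.At L.vorbis_deinit.cut9 others frames Blk u₀ e ret w ∧ (w.reg .r14).toNat = i + 1) := by
  have he := hat.entry
  v_entry he
  obtain ⟨hsh, hok, hlive, hd⟩ := hat.pre
  have hsf' := hsf others frames
  have w_rip := hat.rip
  have c_rsp := hat.rsp
  have c_rbx := hat.rbx
  have w_eq := Vorbis.conv_code_eqOn hat.code
  have hdf : v.flags .df = false := (show abiInv _ from hat.inv).1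
  have hmx : v.mxcsr &&& 0x1F80 = 0x1F80 := (show abiInv _ from hat.inv).2
  have hsse := Vorbis.sseOK_of_abiInv hat.inv
  have hsame := hat.same
  have hob : ObjLive others frames (e.reg .rdi).toNat := ObjLive.of_ob1 hlive hd.ob1
  have hw := hob.where_ hsh.inv hsh.offText (by omega)
  have hsr : Site (Live (stackObjs frames ++ others)) (e.mem.u64 ((e.reg .rdi).toNat + 456) + 32 * i + 24) 8 := by
    apply hd.site_residue hlive (by simp only [vacc, voff]; exact hnz) i (by simp only [vacc, voff]; exact hilt) 24 8
      (by simp only [voff]; omega) (by omega)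
    simp only [vacc, voff]
  have hwr := site_place hsr hsh.inv hsh.offText (by omega)
  obtain ⟨rc, e456⟩ : ∃ n, e.mem.u64 ((e.reg .rdi).toNat + 456) = n := ⟨_, rfl⟩
  rw [e456] at hsr hwr hr12 hnz
  u_walk hcode [hμ.vendor] until [Vorbis.L.vorbis_deinit.cut9] span [Vorbis.L.textLo, Vorbis.L.textHi] side (v_side)
  case check_1076e3 =>
    -- 0x1076e3 (4253): `r->residue_books`, in `residue_config[i]`: H2
    have hun : ShadowUntouched e.mem s_1076e3.mem := by v_untouched
    exact check_site hsh.inv hun hsr (by u_omega)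
  case call_inv =>
    v_inv
  case pre_1076f0 =>
    have hun : ShadowUntouched e.mem s_1076f0.mem := by v_untouched
    refine ⟨hsh.call hun (by u_omega) (by u_omega) (by u_omega), ?_⟩
    rw [w_rdi]
    exact hob
  case cont =>
    -- 0x1076f5 = cut8 (4246): `add r14d, 1`
    v_after_call w_rsp_1076f0 w_mem_1076f0
    u_walk hcode [hμ.vendor] until [Vorbis.L.vorbis_deinit.cut9] span [Vorbis.L.textLo, Vorbis.L.textHi] side (v_side)
    have hs : Mem.SameExcept [⟨(e.reg .rsp).toNat - 96, (e.reg .rsp).toNat - 40⟩] v.mem s_1076f5.mem := by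
      u_same
    have hn := next32 (v.reg .r14) (by omega)
    rw [← w_r14] at hn
    refine ReachVia.done ⟨at_next hat hs w_rip w_rsp (by rw [w_kept .rbx rfl]; exact c_rbx) (w_kept .r15 rfl) (Vorbis.conv_code_in w_eq) ?_, ?_⟩
    · v_inv
    · omega

/-- One round of the residue loop from its head cut9 = 0x1076f9 (4246 – 4253): out to cut10, or through residue `i` (`res_head`,
the class loop if `r->classdata ≠ NULL`, `res_tail`) and back to the head with `i + 1`. -/
theorem res_body {Lay : Layout} (hLay : Lay.hi = 0x1000000) {μ : Microarch} (hμ : UserX.MicroOK μ) {u₀ : State}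
    (hcode : HasCodeNat Lay u₀ Vorbis.L.vorbis_deinit.entry Vorbis.Code.code_vorbis_deinit.nat Vorbis.L.vorbis_deinit.size)
    (h8 : Asan.SmallCheck Lay μ Vorbis.WayInv (Vorbis.CodeOK u₀) [.rax, .rcx, .rdx] 8 Vorbis.L.__asan_load8_noabort.entry)
    (h4 : Asan.SmallCheck Lay μ Vorbis.WayInv (Vorbis.CodeOK u₀) [.rax, .rcx, .rdx] 4 Vorbis.L.__asan_load4_noabort.entry)
    (h1 : Asan.SmallCheck Lay μ Vorbis.WayInv (Vorbis.CodeOK u₀) [.rax, .rdx] 1 Vorbis.L.__asan_load1_noabort.entry)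
    (hsf : ∀ (others : List Obj) (frames : List (Nat × FrameLayout)), Calls Lay μ Vorbis.WayInv (Vorbis.conv u₀) Vorbis.L.setup_free.entry (Vorbis.Spec.setup_free.spec others frames))
    (others : List Obj) (frames : List (Nat × FrameLayout)) (Blk : Block → Prop) (e : State) (ret : Word) (v : State)
    (hnz : e.mem.u64 ((e.reg .rdi).toNat + 456) ≠ 0)
    (hat : vorbis_deinit.At L.vorbis_deinit.cut9 others frames Blk u₀ e ret v) (hi31 : (v.reg .r14).toNat < 2 ^ 31) :
    ReachVia Lay μ WayInv v (fun w => vorbis_deinit.At L.vorbis_deinit.cut10 others frames Blk u₀ e ret w ∨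
      ((vorbis_deinit.At L.vorbis_deinit.cut9 others frames Blk u₀ e ret w ∧ (w.reg .r14).toNat < 2 ^ 31) ∧
        2 ^ 31 - (w.reg .r14).toNat < 2 ^ 31 - (v.reg .r14).toNat)) := by
  have hc := sint32_cases (e.mem.u32 ((e.reg .rdi).toNat + 320))
  have hu := Mem.u32_lt e.mem ((e.reg .rdi).toNat + 320)
  refine (res_head hLay hμ hcode h8 h4 h1 hsf others frames Blk e ret v hat hi31 hnz).trans ?_
  intro w hw
  rcases hw with h10 | ⟨h7, e14, hlt, e12⟩ | ⟨h6, e14, hlt, e12, hj, hcd⟩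
  · -- `i ≥ residue_count`
    exact ReachVia.done (Or.inl h10)
  · -- `r->classdata = NULL`
    refine (res_tail hLay hμ hcode h8 h4 h1 hsf others frames Blk e ret w h7 _ hi31 e14 hlt hnz e12).mono ?_
    intro x hx
    refine Or.inr ⟨⟨hx.1, ?_⟩, ?_⟩
    · omega
    · omega
  · -- `r->classdata ≠ NULL`: the class loop first
    refine (class_loop hLay hμ hcode h8 h4 h1 hsf others frames Blk e ret w h6 _ hi31 e14 hlt hnz e12 hj hcd).trans ?_
    intro y hy
    refine (res_tail hLay hμ hcode h8 h4 h1 hsf others frames Blk e ret y hy.1 _ hi31 hy.2.1 hlt hnz hy.2.2).mono ?_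
    intro x hx
    refine Or.inr ⟨⟨hx.1, ?_⟩, ?_⟩
    · omega
    · omega

/-- **The residue loop** (4246 – 4253), from its head cut9 = 0x1076f9 to the segment's exit cut10 = 0x107745: `ReachVia.loop` over
`res_body`; invariant `At cut9 ∧ i = r14 < 2^31` (and `residue_config ≠ NULL`, a fact of the entry memory), measure `2^31 − i`. -/
theorem res_loop {Lay : Layout} (hLay : Lay.hi = 0x1000000) {μ : Microarch} (hμ : UserX.MicroOK μ) {u₀ : State}
    (hcode : HasCodeNat Lay u₀ Vorbis.L.vorbis_deinit.entry Vorbis.Code.code_vorbis_deinit.nat Vorbis.L.vorbis_deinit.size)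
    (h8 : Asan.SmallCheck Lay μ Vorbis.WayInv (Vorbis.CodeOK u₀) [.rax, .rcx, .rdx] 8 Vorbis.L.__asan_load8_noabort.entry)
    (h4 : Asan.SmallCheck Lay μ Vorbis.WayInv (Vorbis.CodeOK u₀) [.rax, .rcx, .rdx] 4 Vorbis.L.__asan_load4_noabort.entry)
    (h1 : Asan.SmallCheck Lay μ Vorbis.WayInv (Vorbis.CodeOK u₀) [.rax, .rdx] 1 Vorbis.L.__asan_load1_noabort.entry)
    (hsf : ∀ (others : List Obj) (frames : List (Nat × FrameLayout)), Calls Lay μ Vorbis.WayInv (Vorbis.conv u₀) Vorbis.L.setup_free.entry (Vorbis.Spec.setup_free.spec others frames))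
    (others : List Obj) (frames : List (Nat × FrameLayout)) (Blk : Block → Prop) (e : State) (ret : Word) (v : State)
    (hnz : e.mem.u64 ((e.reg .rdi).toNat + 456) ≠ 0)
    (hat : vorbis_deinit.At L.vorbis_deinit.cut9 others frames Blk u₀ e ret v) (hi31 : (v.reg .r14).toNat < 2 ^ 31) :
    ReachVia Lay μ WayInv v (vorbis_deinit.At L.vorbis_deinit.cut10 others frames Blk u₀ e ret) :=
  ReachVia.loop
    (Inv := fun x => vorbis_deinit.At L.vorbis_deinit.cut9 others frames Blk u₀ e ret x ∧ (x.reg .r14).toNat < 2 ^ 31)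
    (fun x => 2 ^ 31 - (x.reg .r14).toNat)
    (fun x hx => res_body hLay hμ hcode h8 h4 h1 hsf others frames Blk e ret x hnz hx.1 hx.2)
    v ⟨hat, hi31⟩

end Vorbis.Spec.vorbis_deinit_1

/-- Segment 1 of `vorbis_deinit` (entry … cut10 = 0x107745): the prologue and `vendor` (`blockA`), the comment loop (`to_loop1`,
`comment_loop`), `if (p->residue_config)` (`to_loop3`) and the residue loop (`res_loop`), chained by `ReachVia.trans`. -/
theorem Vorbis.Spec.Worked.vorbis_deinit_1_ok : Vorbis.Spec.vorbis_deinit_1.Statement := by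
  intro Lay hLay μ hμ u₀ hcode h8 hsf h4 h1 others frames Blk e ret he hpre
  refine (Vorbis.Spec.vorbis_deinit_1.blockA hLay hμ hcode h8 hsf others frames Blk e ret he hpre).trans ?_
  intro v1 hv1
  refine (Vorbis.Spec.vorbis_deinit_1.to_loop1 hLay hμ hcode h8 h4 h1 hsf others frames Blk e ret v1 hv1).trans ?_
  intro v2 hv2
  refine (Vorbis.Spec.vorbis_deinit_1.comment_loop hLay hμ hcode h8 h4 h1 hsf others frames Blk e ret v2 hv2.1 hv2.2).trans ?_
  intro v3 hv3
  refine (Vorbis.Spec.vorbis_deinit_1.to_loop3 hLay hμ hcode h8 h4 h1 hsf others frames Blk e ret v3 hv3).trans ?_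
  intro v4 hv4
  rcases hv4 with h10 | ⟨h9, hi, hnz⟩
  · exact X86.User.ReachVia.done h10
  · exact Vorbis.Spec.vorbis_deinit_1.res_loop hLay hμ hcode h8 h4 h1 hsf others frames Blk e ret v4 hnz h9 hi
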